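-- pv_equiv track=rewrite | github.com/fujitsu4/llm_bias_with_dt | src/decision_tree/decision_tree_core.py | filter_rules_for_class1
-- ===== SOURCE A (Python) =====
-- def filter_rules_for_class1(rules_text: str) -> str:
--     """
--     Reconstruct full decision paths ending in 'class: 1'.
--     Uses indentation depth to track the current branch.
--     """
--
--     lines = rules_text.splitlines()
--     kept_paths = []
--
--     # Stack indexed by depth: stack[depth] = content of that node
--     stack = {}
--
--     for line in lines:
--         stripped = line.strip()
--
--         # ignore non-rule lines
--         if not stripped.startswith("|"):
--             continue
--
--         # depth = number of "|   " blocks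
--         depth = stripped.count("|")
--
--         # update stack at this depth
--         stack[depth] = line
--
--         # prune deeper levels no longer valid
--         depths_to_delete = [d for d in stack.keys() if d > depth]
--         for d in depths_to_delete:
--             del stack[d]
--
--         # CASE: leaf with class = 1
--         if "class: 1" in stripped:
--             # full path = all levels in sorted order
--             path = [stack[d] for d in sorted(stack.keys())]
--
--             # remove any line containing class: 0
--             path = [p for p in path if "class: 0" not in p]
--
--             kept_paths.append("\n".join(path))
--
--     return "\n\n".join(kept_paths)
-- ===== SOURCE B (Python) =====
-- def filter_rules_for_class1(rules_text: str) -> str: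
--     # Stage 1: collect the rule lines once, with their depth and class flags.
--     rules = []
--     for line in rules_text.splitlines():
--         s = line.strip()
--         if s.startswith("|"):
--             rules.append((s.count("|"), line, "class: 1" in s, "class: 0" in line))
--
--     def path_ending_at(i):
--         # Reconstruct the path for leaf i by walking BACKWARD: each ancestor is
--         # the nearest earlier rule line strictly shallower than the current need.
--         d, line, _, z0 = rules[i]
--         rev = [] if z0 else [line]
--         need = d
--         for j in range(i - 1, -1, -1):
--             e, l, _, z = rules[j]
--             if e < need:
--                 need = e
--                 if not z:
--                     rev.append(l)
--         return "\n".join(reversed(rev))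
--
--     return "\n\n".join(path_ending_at(i) for i, r in enumerate(rules) if r[2])
-- ===== Notes on version B (the rewrite author's own statement) =====
-- stated objective: alternative
-- what changed: Replaces the incrementally maintained depth-keyed dict (insert, prune deeper keys, sorted-keys reconstruction per leaf) with a two-stage algorithm: first collect all rule lines with depths/flags, then for each class-1 leaf reconstruct its path independently by a backward scan over the earlier rule lines, picking each nearest strictly-shallower ancestor and building the path back-to-front.
import Mathlib
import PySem

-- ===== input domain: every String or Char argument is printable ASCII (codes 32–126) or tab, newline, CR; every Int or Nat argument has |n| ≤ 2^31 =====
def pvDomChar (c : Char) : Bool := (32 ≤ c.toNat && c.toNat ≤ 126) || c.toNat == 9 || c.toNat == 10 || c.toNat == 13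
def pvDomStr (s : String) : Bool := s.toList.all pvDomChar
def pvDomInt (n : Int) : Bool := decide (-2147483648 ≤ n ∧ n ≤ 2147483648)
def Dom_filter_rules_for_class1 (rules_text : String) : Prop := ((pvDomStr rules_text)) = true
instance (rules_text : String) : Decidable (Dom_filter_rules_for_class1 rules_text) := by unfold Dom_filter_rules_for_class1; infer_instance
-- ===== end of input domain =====

-- B replaces A's incrementally maintained depth-keyed dict (+ prune pass + sorted-keys
-- reconstruction) with a two-stage algorithm: collect the rule lines once, then rebuild each
-- class-1 leaf's path independently by a backward scan for nearest shallower ancestors.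


-- ===== PORT A =====
-- loop body of A's for-loop: state = (kept_paths, stack : dict depth → line)
def pvStepA (st : List String × PySem.Dict Int String) (line : String) :
    List String × PySem.Dict Int String :=
  let stripped := PySem.Str.strip line
  if !(PySem.Str.startswith stripped "|") then st
  else
    let depth : Int := (PySem.Str.count stripped "|" : Int)
    let stack := st.2.insert depth line
    let depths_to_delete := stack.keys.filter (fun d => decide (d > depth))
    let stack := depths_to_delete.foldl (fun s d => s.erase d) stack
    if PySem.Str.isIn "class: 1" stripped then
      -- stack[d] for d in sorted(stack.keys()): every key d is present, so getD d "" = stack[d]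
      let path := (PySem.List.sorted stack.keys (fun x => x) false).map (fun d => stack.getD d "")
      let path := path.filter (fun p => !(PySem.Str.isIn "class: 0" p))
      (st.1 ++ [PySem.Str.join "\n" path], stack)
    else (st.1, stack)

def filter_rules_for_class1 (rules_text : String) : String :=
  let lines := PySem.Str.splitlines rules_text
  PySem.Str.join "\n\n" (lines.foldl pvStepA ([], PySem.Dict.empty)).1

-- ===== PORT B =====
-- stage 1 loop body: rules.append((depth, line, "class: 1" in s, "class: 0" in line))
def pvRuleStep (acc : List (Int × String × Bool × Bool)) (line : String) :
    List (Int × String × Bool × Bool) :=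
  if PySem.Str.startswith (PySem.Str.strip line) "|" then
    acc ++ [(((PySem.Str.count (PySem.Str.strip line) "|" : Nat) : Int), line,
             PySem.Str.isIn "class: 1" (PySem.Str.strip line),
             PySem.Str.isIn "class: 0" line)]
  else acc

def pvRules (rules_text : String) : List (Int × String × Bool × Bool) :=
  (PySem.Str.splitlines rules_text).foldl pvRuleStep []

-- body of B's backward for-j loop: state = (need, rev)
def pvBackStep (st : Int × List String) (r : Int × String × Bool × Bool) :
    Int × List String :=
  if r.1 < st.1 then (r.1, if r.2.2.2 then st.2 else st.2 ++ [r.2.1]) else st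

-- path_ending_at i, given pre = rules[:i]: the 'for j in range(i-1, -1, -1)' loop
-- visits exactly pre in reverse order
def pvPathEnd (pre : List (Int × String × Bool × Bool)) (r : Int × String × Bool × Bool) :
    String :=
  let rev0 : List String := if r.2.2.2 then [] else [r.2.1]
  let res := pre.reverse.foldl pvBackStep (r.1, rev0)
  PySem.Str.join "\n" res.2.reverse

def filter_rules_for_class1_alt (rules_text : String) : String :=
  let rules := pvRules rules_text
  -- enumerate indices are ≥ 0, so rules[:i] is rules.take i.toNat
  PySem.Str.join "\n\n"
    (((PySem.List.enumerate rules 0).filter (fun p => p.2.2.2.1)).map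
      (fun p => pvPathEnd (rules.take p.1.toNat) p.2))

-- ===== PRECONDITION & SPEC =====
def Spec_filter_rules_for_class1 (rules_text : String) (out : String) : Prop := out = filter_rules_for_class1_alt rules_text
instance (rules_text : String) (out : String) : Decidable (Spec_filter_rules_for_class1 rules_text out) := by unfold Spec_filter_rules_for_class1; infer_instance

-- ===== CLAIM (what is proved, stated in full; the proofs are below) =====
def Claim_equal_filter_rules_for_class1 : Prop := ∀ (rules_text : String), Dom_filter_rules_for_class1 rules_text → Spec_filter_rules_for_class1 rules_text (filter_rules_for_class1 rules_text)

-- ===== LEMMAS AND PROOFS =====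

-- the rule tuple B stores for a rule line
def pvMk (line : String) : Int × String × Bool × Bool :=
  (((PySem.Str.count (PySem.Str.strip line) "|" : Nat) : Int), line,
   PySem.Str.isIn "class: 1" (PySem.Str.strip line), PySem.Str.isIn "class: 0" line)

def pvIsRule (line : String) : Bool := PySem.Str.startswith (PySem.Str.strip line) "|"

-- proof-side intermediate: the ancestor chain as a strictly-increasing-depth stack
def pvPush (s : List (Int × String × Bool × Bool)) (r : Int × String × Bool × Bool) :
    List (Int × String × Bool × Bool) :=
  s.filter (fun p => decide (p.1 < r.1)) ++ [r]

def pvStk (rs : List (Int × String × Bool × Bool)) : List (Int × String × Bool × Bool) :=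
  rs.foldl pvPush []

def pvEmit (s : List (Int × String × Bool × Bool)) : String :=
  PySem.Str.join "\n" ((s.filter (fun p => !p.2.2.2)).map (fun p => p.2.1))

def pvStep4 (st : List String × List (Int × String × Bool × Bool))
    (r : Int × String × Bool × Bool) : List String × List (Int × String × Bool × Bool) :=
  let s := pvPush st.2 r
  (if r.2.2.1 then st.1 ++ [pvEmit s] else st.1, s)

-- coupling invariant between A's dict and the chain stack
def pvInv (d : PySem.Dict Int String) (s : List (Int × String × Bool × Bool)) : Prop :=
  d.keys.Nodup ∧ d.keys.Perm (s.map (·.1)) ∧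
  (∀ p ∈ s, d.get? p.1 = some p.2.1) ∧ s.Pairwise (fun a b => a.1 < b.1) ∧
  (∀ p ∈ s, p = pvMk p.2.1)

-- folding erase removes exactly the items whose key is in the deletion list
theorem pvEraseFold (D : List Int) (d : PySem.Dict Int String) :
    (D.foldl (fun s k => s.erase k) d).items = d.items.filter (fun p => decide (p.1 ∉ D)) := by
  induction D generalizing d with
  | nil => simp
  | cons k D ih =>
      have he : (d.erase k).items = d.items.filter (fun p => p.1 != k) := by
        unfold PySem.Dict.erase; rfl
      simp only [List.foldl_cons, ih, he, List.filter_filter]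
      apply List.filter_congr
      intro p _
      by_cases h1 : p.1 = k <;> by_cases h2 : p.1 ∈ D <;> simp [h1, h2]

-- on a nodup list containing dep, filter (≤ dep) is a permutation of filter (< dep) ++ [dep]
theorem pvFilterLe_nodup (L : List Int) (dep : Int) (hn : L.Nodup) (hm : dep ∈ L) :
    (L.filter (fun x => decide (x ≤ dep))).Perm
      ((L.filter (fun x => decide (x < dep))) ++ [dep]) := by
  have hsplit := (List.filter_append_perm (fun x => decide (x < dep))
    (L.filter (fun x => decide (x ≤ dep)))).symm
  rw [List.filter_filter, List.filter_filter] at hsplit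
  have h1 : L.filter (fun a => decide (a < dep) && decide (a ≤ dep)) =
      L.filter (fun x => decide (x < dep)) := by
    apply List.filter_congr; intro x _
    rw [← Bool.decide_and, decide_eq_decide]; omega
  have h2 : L.filter (fun a => !decide (a < dep) && decide (a ≤ dep)) =
      L.filter (fun x => x == dep) := by
    apply List.filter_congr; intro x _
    by_cases hx : x = dep
    · simp [hx]
    · have hd : ¬ (x ≤ dep) ∨ x < dep := by omega
      rcases hd with hd | hd <;> simp [hx, hd]
  rw [h1, h2, List.filter_beq, List.count_eq_one_of_mem hn hm, List.replicate_one] at hsplit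
  exact hsplit

-- A's per-line dict update (insert, then prune deeper keys), as one function
def pvDictStep (d : PySem.Dict Int String) (dep : Int) (line : String) : PySem.Dict Int String :=
  let d1 := d.insert dep line
  (d1.keys.filter (fun k => decide (k > dep))).foldl (fun s k => s.erase k) d1

theorem pvCore (d : PySem.Dict Int String) (s : List (Int × String × Bool × Bool))
    (line : String) (h : pvInv d s) :
    pvInv (pvDictStep d (pvMk line).1 line) (pvPush s (pvMk line)) ∧
    ((PySem.List.sorted (pvDictStep d (pvMk line).1 line).keys (fun x => x) false).map
        (fun k => (pvDictStep d (pvMk line).1 line).getD k "")).filter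
          (fun p => !(PySem.Str.isIn "class: 0" p))
      = ((pvPush s (pvMk line)).filter (fun p => !p.2.2.2)).map (fun p => p.2.1) := by
  obtain ⟨hnd, hperm, hget, hpw, hwf⟩ := h
  set dep : Int := (pvMk line).1 with hdep
  have hss : pvPush s (pvMk line)
      = s.filter (fun p => decide (p.1 < dep)) ++ [pvMk line] := rfl
  have hnd1 : (d.insert dep line).keys.Nodup := PySem.Dict.nodup_keys_insert d dep line hnd
  have hitems : (pvDictStep d dep line).items
      = (d.insert dep line).items.filter (fun p => decide (p.1 ≤ dep)) := by
    unfold pvDictStep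
    rw [pvEraseFold]
    apply List.filter_congr
    intro p hp
    have hkmem : p.1 ∈ (d.insert dep line).keys := by
      simp only [PySem.Dict.keys]; exact List.mem_map_of_mem hp
    rw [decide_eq_decide]
    simp only [List.mem_filter, hkmem, true_and, decide_eq_true_eq]
    omega
  have hkeys : (pvDictStep d dep line).keys
      = (d.insert dep line).keys.filter (fun x => decide (x ≤ dep)) := by
    simp only [PySem.Dict.keys, hitems]
    simp [List.filter_map, Function.comp_def]
  have hnd2 : (pvDictStep d dep line).keys.Nodup := by rw [hkeys]; exact hnd1.filter _
  have hmapfst : (pvPush s (pvMk line)).map (·.1)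
      = (s.map (·.1)).filter (fun x => decide (x < dep)) ++ [dep] := by
    rw [hss]
    simp [List.filter_map, Function.comp_def, ← hdep]
  have hperm2 : (pvDictStep d dep line).keys.Perm ((pvPush s (pvMk line)).map (·.1)) := by
    rw [hkeys, hmapfst]
    by_cases hc : d.contains dep = true
    · rw [PySem.Dict.keys_insert_of_contains d line hc]
      have hdepmem : dep ∈ s.map (·.1) :=
        hperm.mem_iff.mp ((PySem.Dict.contains_iff_mem_keys d dep).mp hc)
      have hnds : (s.map (·.1)).Nodup := hperm.nodup hnd
      exact (hperm.filter _).trans (pvFilterLe_nodup _ dep hnds hdepmem)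
    · rw [Bool.not_eq_true] at hc
      have hdnot : dep ∉ d.keys := fun hm =>
        by rw [(PySem.Dict.contains_iff_mem_keys d dep).mpr hm] at hc; exact Bool.true_eq_false.mp hc
      rw [PySem.Dict.keys_insert_of_not_contains d line hc, List.filter_append]
      have hfe : d.keys.filter (fun x => decide (x ≤ dep)) =
          d.keys.filter (fun x => decide (x < dep)) := by
        apply List.filter_congr
        intro x hx
        have : x ≠ dep := fun e => hdnot (e ▸ hx)
        rw [decide_eq_decide]; omega
      rw [hfe]
      simp only [List.filter_cons, List.filter_nil, le_refl, decide_true, if_true]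
      exact (hperm.filter _).append (List.Perm.refl _)
  have hget2 : ∀ p ∈ pvPush s (pvMk line), (pvDictStep d dep line).get? p.1 = some p.2.1 := by
    intro p hp
    rw [hss] at hp
    rw [PySem.Dict.get?_eq_some_iff_mem_items _ _ _ hnd2, hitems, List.mem_filter]
    rcases List.mem_append.mp hp with hp | hp
    · rw [List.mem_filter] at hp
      obtain ⟨hps, hplt⟩ := hp
      rw [decide_eq_true_eq] at hplt
      have hne : p.1 ≠ dep := by omega
      have hg1 : (d.insert dep line).get? p.1 = some p.2.1 := by
        rw [PySem.Dict.get?_insert_of_ne d line hne]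
        exact hget p hps
      exact ⟨PySem.Dict.mem_items_of_get?_eq_some _ hg1, by simp; omega⟩
    · rw [List.mem_singleton] at hp
      subst hp
      exact ⟨PySem.Dict.mem_items_of_get?_eq_some _ (PySem.Dict.get?_insert_self d dep line),
        by rw [hdep]; simp⟩
  have hpw2 : (pvPush s (pvMk line)).Pairwise (fun a b => a.1 < b.1) := by
    rw [hss]
    apply List.pairwise_append.mpr
    refine ⟨hpw.filter _, List.pairwise_singleton _ _, ?_⟩
    intro a ha b hb
    rw [List.mem_filter] at ha
    rw [List.mem_singleton] at hb
    subst hb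
    have := ha.2
    rw [decide_eq_true_eq] at this
    simpa using this
  have hwf2 : ∀ p ∈ pvPush s (pvMk line), p = pvMk p.2.1 := by
    intro p hp
    rw [hss] at hp
    rcases List.mem_append.mp hp with hp | hp
    · exact hwf p (List.mem_filter.mp hp).1
    · rw [List.mem_singleton] at hp; subst hp; rfl
  refine ⟨⟨hnd2, hperm2, hget2, hpw2, hwf2⟩, ?_⟩
  have hsorted : PySem.List.sorted (pvDictStep d dep line).keys (fun x => x) false
      = (pvPush s (pvMk line)).map (·.1) :=
    PySem.List.sorted_eq_of_perm_of_pairwise_lt _ _ _ hperm2.symm (List.pairwise_map.mpr hpw2)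
  rw [hsorted, List.map_map]
  have hvals : (pvPush s (pvMk line)).map ((fun k => (pvDictStep d dep line).getD k "") ∘ (·.1))
      = (pvPush s (pvMk line)).map (fun p => p.2.1) :=
    List.map_congr_left fun p hp => by
      have hg := hget2 p hp
      simp [PySem.Dict.getD_eq_get?_getD, hg]
  rw [hvals, List.filter_map]
  congr 1
  apply List.filter_congr
  intro p hp
  rw [hwf2 p hp]
  rfl

-- one A-line step matches one intermediate step (or is skipped)
set_option maxHeartbeats 4000000 in
theorem pvStep_inv (d : PySem.Dict Int String) (s : List (Int × String × Bool × Bool))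
    (kA kB : List String) (hk : kA = kB) (h : pvInv d s) (line : String) :
    (if pvIsRule line then
        (pvStepA (kA, d) line).1 = (pvStep4 (kB, s) (pvMk line)).1 ∧
          pvInv (pvStepA (kA, d) line).2 (pvStep4 (kB, s) (pvMk line)).2
      else (pvStepA (kA, d) line) = (kA, d)) := by
  by_cases hsw : PySem.Str.startswith (PySem.Str.strip line) "|" = true
  · obtain ⟨hinv, hpath⟩ := pvCore d s line h
    simp only [pvIsRule, hsw, if_true]
    simp only [pvStepA, pvStep4, hsw, Bool.not_true, Bool.false_eq_true, if_false]
    have hdep : ((PySem.Str.count (PySem.Str.strip line) "|" : Nat) : Int) = (pvMk line).1 := rfl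
    by_cases hcl : PySem.Str.isIn "class: 1" (PySem.Str.strip line) = true
    · have hcl' : (pvMk line).2.2.1 = true := hcl
      simp only [hcl, hcl', if_true]
      constructor
      · simp only [hk]
        congr 1
        simp only [pvEmit]
        rw [← hpath]
        rfl
      · exact hinv
    · rw [Bool.not_eq_true] at hcl
      have hcl' : (pvMk line).2.2.1 = false := hcl
      simp only [hcl, hcl', Bool.false_eq_true, if_false]
      exact ⟨hk, hinv⟩
  · rw [Bool.not_eq_true] at hsw
    simp only [pvIsRule, hsw, Bool.false_eq_true, if_false]
    simp only [pvStepA, hsw, Bool.not_false, if_true]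

-- stage 1 builds exactly the pvMk tuples of the rule lines
theorem pvRules_eq (lines : List String) (acc : List (Int × String × Bool × Bool)) :
    lines.foldl pvRuleStep acc = acc ++ (lines.filter pvIsRule).map pvMk := by
  induction lines generalizing acc with
  | nil => simp
  | cons l t ih =>
      by_cases hl : PySem.Str.startswith (PySem.Str.strip l) "|" = true
      · have hstep : pvRuleStep acc l = acc ++ [pvMk l] := by
          unfold pvRuleStep
          rw [if_pos hl]
          rfl
        have hfl : pvIsRule l = true := hl
        rw [List.foldl_cons, hstep, ih, List.filter_cons, hfl]
        simp only [if_true, List.map_cons, List.append_assoc, List.singleton_append]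
      · rw [Bool.not_eq_true] at hl
        have hstep : pvRuleStep acc l = acc := by
          unfold pvRuleStep
          rw [if_neg]
          rw [hl]
          simp
        have hfl : pvIsRule l = false := hl
        rw [List.foldl_cons, hstep, ih, List.filter_cons, hfl]
        simp

-- A's fold over raw lines equals the intermediate fold over the rule tuples
set_option maxHeartbeats 4000000 in
theorem pvLoopA (lines : List String) (kA kB : List String) (d : PySem.Dict Int String)
    (s : List (Int × String × Bool × Bool)) (hk : kA = kB) (h : pvInv d s) :
    (lines.foldl pvStepA (kA, d)).1
      = (((lines.filter pvIsRule).map pvMk).foldl pvStep4 (kB, s)).1 := by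
  induction lines generalizing kA kB d s with
  | nil => simpa using hk
  | cons l t ih =>
      have hstep := pvStep_inv d s kA kB hk h l
      by_cases hl : pvIsRule l = true
      · rw [if_pos hl] at hstep
        simp only [List.foldl_cons, List.filter_cons, hl, if_true, List.map_cons]
        exact ih _ _ _ _ hstep.1 hstep.2
      · rw [Bool.not_eq_true] at hl
        rw [if_neg (by simp [hl])] at hstep
        simp only [List.foldl_cons, List.filter_cons, hl, Bool.false_eq_true, if_false, hstep]
        exact ih _ _ _ _ hk h

-- backward scan over a prefix selects exactly the chain-stack entries below `need`,
-- deepest first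
theorem pvBackScan (pre : List (Int × String × Bool × Bool)) (need : Int) (rev : List String) :
    (pre.reverse.foldl pvBackStep (need, rev)).2
      = rev ++ (((pvStk pre).filter (fun p => decide (p.1 < need))).filter
          (fun p => !p.2.2.2)).reverse.map (fun p => p.2.1) := by
  induction pre using List.reverseRecOn generalizing need rev with
  | nil => simp [pvStk]
  | append_singleton pre r ih =>
      have hstk : pvStk (pre ++ [r]) = (pvStk pre).filter (fun p => decide (p.1 < r.1)) ++ [r] := by
        simp [pvStk, List.foldl_append, pvPush]
      rw [List.reverse_append]
      simp only [List.reverse_singleton, List.singleton_append, List.foldl_cons]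
      by_cases hr : r.1 < need
      · have hbs : pvBackStep (need, rev) r
            = (r.1, if r.2.2.2 then rev else rev ++ [r.2.1]) := by
          simp [pvBackStep, hr]
        rw [hbs, ih]
        have hfe : ((pvStk pre).filter (fun p => decide (p.1 < r.1))).filter
            (fun p => decide (p.1 < need)) = (pvStk pre).filter (fun p => decide (p.1 < r.1)) := by
          apply List.filter_eq_self.mpr
          intro p hp
          have := (List.mem_filter.mp hp).2
          rw [decide_eq_true_eq] at this
          rw [decide_eq_true_eq]
          omega
        rw [hstk, List.filter_append, hfe, List.filter_append]
        by_cases hz : r.2.2.2 = true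
        · simp [hz]
        · rw [Bool.not_eq_true] at hz
          simp only [hz, Bool.false_eq_true, if_false]
          simp [hr, hz]
      · have hbs : pvBackStep (need, rev) r = (need, rev) := by
          simp [pvBackStep, hr]
        rw [hbs, ih, hstk, List.filter_append]
        have hfe : ((pvStk pre).filter (fun p => decide (p.1 < r.1))).filter
            (fun p => decide (p.1 < need)) = (pvStk pre).filter (fun p => decide (p.1 < need)) := by
          rw [List.filter_filter]
          apply List.filter_congr
          intro p _
          rw [← Bool.decide_and, decide_eq_decide]
          omega
        rw [hfe]
        simp [hr]

-- B's per-leaf backward reconstruction = the emission from the chain stack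
theorem pvPathEnd_eq (pre : List (Int × String × Bool × Bool))
    (r : Int × String × Bool × Bool) :
    pvPathEnd pre r = pvEmit (pvPush (pvStk pre) r) := by
  simp only [pvPathEnd, pvEmit]
  rw [pvBackScan, pvPush, List.filter_append, List.map_append]
  by_cases hz : r.2.2.2 = true
  · simp [hz]
  · rw [Bool.not_eq_true] at hz
    simp [hz]

-- the intermediate fold produces exactly B's per-leaf paths
theorem pvLoopB (rules : List (Int × String × Bool × Bool)) :
    rules.foldl pvStep4 ([], [])
      = (((PySem.List.enumerate rules 0).filter (fun p => p.2.2.2.1)).map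
          (fun p => pvPathEnd (rules.take p.1.toNat) p.2), pvStk rules) := by
  induction rules using List.reverseRecOn with
  | nil => simp [pvStk, PySem.List.enumerate_nil]
  | append_singleton rules r ih =>
      rw [List.foldl_append, List.foldl_cons, List.foldl_nil, ih]
      have hstk : pvStk (rules ++ [r]) = pvPush (pvStk rules) r := by
        simp [pvStk, List.foldl_append]
      have henum : PySem.List.enumerate (rules ++ [r]) 0
          = PySem.List.enumerate rules 0 ++ [((rules.length : Int), r)] := by
        rw [PySem.List.enumerate_append]
        simp [PySem.List.enumerate_cons, PySem.List.enumerate_nil]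
      have hmapold : ((PySem.List.enumerate rules 0).filter (fun p => p.2.2.2.1)).map
            (fun p => pvPathEnd ((rules ++ [r]).take p.1.toNat) p.2)
          = ((PySem.List.enumerate rules 0).filter (fun p => p.2.2.2.1)).map
            (fun p => pvPathEnd (rules.take p.1.toNat) p.2) := by
        apply List.map_congr_left
        intro p hp
        have hm := (List.mem_filter.mp hp).1
        obtain ⟨k, hk, hpk⟩ := (PySem.List.mem_enumerate_iff _ _ _).mp hm
        have h1 : p.1.toNat = k := by rw [hpk]; simp
        rw [h1, List.take_append_of_le_length (le_of_lt hk)]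
      rw [henum, List.filter_append, List.map_append, hmapold, hstk]
      simp only [pvStep4]
      by_cases h1 : r.2.2.1 = true
      · simp [h1, pvPathEnd_eq]
      · rw [Bool.not_eq_true] at h1
        simp [h1]

-- ===== VERDICT (by name: the statement is the Claim_ definition above) =====
theorem filter_rules_for_class1_spec : Claim_equal_filter_rules_for_class1 := by
  intro rt _
  unfold Spec_filter_rules_for_class1 filter_rules_for_class1 filter_rules_for_class1_alt
  have h0 : pvInv PySem.Dict.empty [] := by
    refine ⟨?_, ?_, ?_, ?_, ?_⟩ <;> simp [PySem.Dict.empty, PySem.Dict.keys]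
  have hA := pvLoopA (PySem.Str.splitlines rt) [] [] PySem.Dict.empty [] rfl h0
  have hR : pvRules rt = ((PySem.Str.splitlines rt).filter pvIsRule).map pvMk :=
    pvRules_eq _ []
  have hB := pvLoopB (pvRules rt)
  simp only [hA, ← hR, hB]
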